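-- pv_equiv track=rewrite | github.com/ckstjrl/algorithm-study | seonil/BOJ/PYTHON/boj2164.py | last_card
-- ===== SOURCE A (Python) =====
-- def last_card(N):
--     queue = [0] * (N + 1)  # 원형 큐
--     front, rear = 0, 0
--
--     # 큐 초기화: 1 ~ N
--     for i in range(1, N + 1):
--         rear = (rear + 1) % (N + 1)
--         queue[rear] = i
--
--     # 카드가 한 장 남을 때까지 반복
--     while (front + 1) % (N + 1) != rear:
--
--         # 1. 맨 위의 카드 버리기 (dequeue)
--         front = (front + 1) % (N + 1)
--
--         # 2. 맨 위의 카드를 맨 아래로 옮기기 (dequeue 후 enqueue)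
--         front = (front + 1) % (N + 1)
--         card = queue[front]
--         rear = (rear + 1) % (N + 1)
--         queue[rear] = card
--
--     # 큐의 마지막에 남은 카드 한 장에 적힌 숫자를 반환
--     return queue[rear]
-- ===== SOURCE B (Python) =====
-- def last_card(N):
--     # closed form: survivor is N when N is a power of two, else 2*(N - 2**floor(log2 N))
--     p = 1
--     while p * 2 <= N:
--         p *= 2
--     return N if N == p else 2 * (N - p)
-- ===== Notes on version B (the rewrite author's own statement) =====
-- stated objective: faster
-- what changed: Replaces the O(N) circular-queue discard/rotate simulation by the Josephus closed form 2*(N - 2^floor(log2 N)) (N itself for powers of two), computed with an O(log N) doubling loop.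
-- outside the precondition, e.g. on last_card(0): A returns 0, B returns -2
import Mathlib
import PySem

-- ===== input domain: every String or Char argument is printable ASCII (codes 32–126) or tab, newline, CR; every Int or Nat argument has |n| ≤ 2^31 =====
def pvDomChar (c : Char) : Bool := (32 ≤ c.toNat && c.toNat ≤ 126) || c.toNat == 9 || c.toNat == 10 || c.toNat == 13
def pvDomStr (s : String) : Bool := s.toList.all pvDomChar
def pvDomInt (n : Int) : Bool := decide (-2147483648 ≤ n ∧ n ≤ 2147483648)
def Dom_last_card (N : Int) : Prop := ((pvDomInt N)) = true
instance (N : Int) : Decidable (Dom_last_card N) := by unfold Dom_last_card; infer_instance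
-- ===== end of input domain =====

-- B replaces A's O(N) circular-queue discard/rotate simulation by the Josephus closed form,
-- computed with a doubling loop (a timing run measures the speed-up).

-- ===== PORT A =====
-- the init loop: for i in range(1, N+1): rear = (rear+1) % (N+1); queue[rear] = i
def pvInitA (n : Nat) (N : Int) : List Int × Nat :=
  (PySem.List.pyRange 1 (N + 1) 1).foldl
    (fun s i =>
      let rear := (s.2 + 1) % n
      (s.1.set rear i, rear))
    (List.replicate n 0, 0)

-- the while loop; fuel only bounds the iteration count (the loop runs N-1 times, so fuel = N.toNat
-- is never exhausted under Pre_); queue[...] is ported as getD _ 0: under Pre_ every index is in range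
def pvLoopA (n : Nat) (fuel : Nat) (queue : List Int) (front rear : Nat) : Int :=
  match fuel with
  | 0 => queue.getD rear 0
  | fuel + 1 =>
    if (front + 1) % n ≠ rear then
      let front1 := (front + 1) % n
      let front2 := (front1 + 1) % n
      let card := queue.getD front2 0
      let rear1 := (rear + 1) % n
      pvLoopA n fuel (queue.set rear1 card) front2 rear1
    else queue.getD rear 0

def last_card (N : Int) : Int :=
  let n := (N + 1).toNat
  let s := pvInitA n N
  pvLoopA n N.toNat s.1 0 s.2

-- ===== PORT B =====
-- while p * 2 <= N: p *= 2   (fuel = N.toNat bounds the iterations; p doubles, so it is never exhausted)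
def pvAltLoop (fuel : Nat) (N p : Int) : Int :=
  match fuel with
  | 0 => p
  | fuel + 1 => if p * 2 ≤ N then pvAltLoop fuel N (p * 2) else p

def last_card_alt (N : Int) : Int :=
  let p := pvAltLoop N.toNat N 1
  if N = p then N else 2 * (N - p)

-- ===== PRECONDITION & SPEC =====
-- Pre_ excludes N < 0, where A raises (ZeroDivisionError / IndexError), and N = 0, where A's
-- returned 0 is an artefact of the dummy slot of its circular buffer (no card is numbered 0).
def Pre_last_card (N : Int) : Prop := 1 ≤ N
instance (N : Int) : Decidable (Pre_last_card N) := by unfold Pre_last_card; infer_instance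

def pvWitness_last_card : Int := 6

def Spec_last_card (N : Int) (out : Int) : Prop := out = last_card_alt N
instance (N : Int) (out : Int) : Decidable (Spec_last_card N out) := by unfold Spec_last_card; infer_instance

-- ===== CLAIM (what is proved, stated in full; the proofs are below) =====
def Claim_equal_last_card : Prop := ∀ (N : Int), Dom_last_card N → Pre_last_card N → Spec_last_card N (last_card N)

-- ===== LEMMAS AND PROOFS =====
def josephus : List Int → Int
  | [] => 0
  | [x] => x
  | _ :: b :: rest => josephus (rest ++ [b])
termination_by l => l.length
decreasing_by simp

lemma josephus_step (a b : Int) (rest : List Int) :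
    josephus (a :: b :: rest) = josephus (rest ++ [b]) := by
  simp [josephus]

lemma josephus_map (f : Int → Int) : ∀ (l : List Int), l ≠ [] →
    josephus (l.map f) = f (josephus l) := by
  intro l
  induction hn : l.length using Nat.strong_induction_on generalizing l with
  | _ n ih =>
    match l with
    | [] => intro h; exact absurd rfl h
    | [x] => intro _; simp [josephus]
    | a :: b :: rest =>
      intro _
      subst hn
      simp only [List.map_cons, josephus_step]
      rw [show List.map f rest ++ [f b] = (rest ++ [b]).map f by simp]
      rw [ih (rest ++ [b]).length (by simp) (rest ++ [b]) rfl (by simp)]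

lemma josephus_round (ps : List (Int × Int)) (acc : List Int) :
    josephus ((ps.flatMap fun p => [p.1, p.2]) ++ acc) = josephus (acc ++ ps.map Prod.snd) := by
  induction ps generalizing acc with
  | nil => simp
  | cons p ps ih =>
    simp only [List.flatMap_cons, List.map_cons, List.cons_append,
      List.nil_append]
    rw [josephus_step, List.append_assoc, ih (acc ++ [p.2])]
    simp

def pvL (m : Nat) : List Int := (List.range m).map (fun i : Nat => (i : Int) + 1)

lemma pvL_ne_nil (m : Nat) (hm : 1 ≤ m) : pvL m ≠ [] := by
  intro h
  have := congrArg List.length h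
  simp [pvL] at this
  omega

lemma pvL_flat (m : Nat) :
    pvL (2 * m) = ((List.range m).map (fun i : Nat => ((2 * (i : Int) + 1), (2 * (i : Int) + 2)))).flatMap
      (fun p => [p.1, p.2]) := by
  induction m with
  | zero => simp [pvL]
  | succ t ih =>
    have h1 : List.range (2 * (t + 1)) = List.range (2 * t) ++ [2 * t, 2 * t + 1] := by
      rw [show 2 * (t + 1) = (2 * t + 1) + 1 by ring, List.range_succ, List.range_succ]
      simp
    simp only [pvL] at ih ⊢
    rw [h1, List.map_append, ih, List.range_succ, List.map_append, List.flatMap_append]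
    simp
    omega

lemma pvL_snd (m : Nat) :
    ((List.range m).map (fun i : Nat => ((2 * (i : Int) + 1), (2 * (i : Int) + 2)))).map Prod.snd
      = (pvL m).map (fun x => 2 * x) := by
  simp only [pvL, List.map_map]
  apply List.map_congr_left
  intro x _
  simp
  ring

lemma josephus_even (m : Nat) (hm : 1 ≤ m) :
    josephus (pvL (2 * m)) = 2 * josephus (pvL m) := by
  have h := josephus_round ((List.range m).map (fun i : Nat => ((2 * (i : Int) + 1), (2 * (i : Int) + 2)))) []
  rw [List.append_nil, List.nil_append, ← pvL_flat, pvL_snd] at h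
  rw [h, josephus_map _ _ (pvL_ne_nil m hm)]

lemma pvL_cons (t : Nat) :
    pvL (t + 1) = 1 :: (List.range t).map (fun i : Nat => (i : Int) + 2) := by
  simp only [pvL, List.range_succ_eq_map, List.map_cons, List.map_map, Nat.cast_zero, zero_add]
  congr 1

lemma pvL_shift (t : Nat) :
    (pvL (t + 1)).map (fun x => if x = ((t : Int) + 1) then 1 else x + 1)
      = (List.range t).map (fun i : Nat => (i : Int) + 2) ++ [1] := by
  have h : pvL (t + 1) = (List.range t).map (fun i : Nat => (i : Int) + 1) ++ [(t : Int) + 1] := by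
    simp [pvL, List.range_succ]
  rw [h, List.map_append, List.map_map]
  congr 1
  · apply List.map_congr_left
    intro x hx
    simp only [Function.comp_apply]
    rw [if_neg (by simp at hx; omega)]
    ring
  · simp

lemma josephus_odd (m : Nat) (hm : 1 ≤ m) :
    josephus (pvL (2 * m + 1)) =
      2 * (if josephus (pvL m) = (m : Int) then 1 else josephus (pvL m) + 1) := by
  obtain ⟨t, rfl⟩ : ∃ t, m = t + 1 := ⟨m - 1, by omega⟩
  have hflat : pvL (2 * (t + 1) + 1)
      = ((List.range (t+1)).map (fun i : Nat => ((2 * (i : Int) + 1), (2 * (i : Int) + 2)))).flatMap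
          (fun p => [p.1, p.2]) ++ [(2 * (t : Int) + 3)] := by
    rw [← pvL_flat]
    simp [pvL, List.range_succ]
    ring
  rw [hflat, josephus_round, pvL_snd]
  -- list is (2t+3) :: map (2*) (pvL (t+1)) = (2t+3) :: 2 :: …
  rw [pvL_cons, List.map_cons]
  norm_num
  rw [josephus_step]
  have target : (List.range t).map ((fun x : Int => 2 * x) ∘ (fun i : Nat => (i : Int) + 2)) ++ [(2:Int)]
      = ((pvL (t + 1)).map (fun x => if x = ((t : Int) + 1) then 1 else x + 1)).map (fun x : Int => 2 * x) := by
    rw [pvL_shift, List.map_append, List.map_map]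
    norm_num
  rw [target]
  rw [josephus_map _ _ (by rw [pvL_shift]; simp), josephus_map _ _ (pvL_ne_nil _ (by omega))]
  rw [← pvL_cons]
  split <;> simp_all

lemma josephus_closed (m : Nat) : ∀ (k : Nat), 1 ≤ m → 2 ^ k ≤ m → m < 2 ^ (k + 1) →
    josephus (pvL m) = if m = 2 ^ k then (m : Int) else 2 * ((m : Int) - (2 ^ k : Nat)) := by
  induction m using Nat.strong_induction_on with
  | _ m ih =>
    intro k h1 h2 h3
    match m, h1 with
    | 1, _ =>
      have hk : k = 0 := by
        by_contra hk
        have : 2 ≤ 2 ^ k := by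
          calc 2 = 2 ^ 1 := rfl
          _ ≤ 2 ^ k := Nat.pow_le_pow_right (by norm_num) (by omega)
        omega
      subst hk
      simp [pvL, josephus]
    | (m + 2), _ =>
      have hk1 : 1 ≤ k := by
        by_contra hk
        have : k = 0 := by omega
        subst this
        simp at h3
      obtain ⟨k, rfl⟩ : ∃ k', k = k' + 1 := ⟨k - 1, by omega⟩
      have hpow : (2:Nat) ^ (k + 1) = 2 * 2 ^ k := by ring
      rcases Nat.even_or_odd (m + 2) with he | ho
      · obtain ⟨j, hj⟩ := he
        have hj2 : m + 2 = 2 * j := by omega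
        rw [hj2, josephus_even j (by omega),
          ih j (by omega) k (by omega) (by omega) (by omega)]
        by_cases hc : j = 2 ^ k
        · rw [if_pos hc, if_pos (by omega)]
          push_cast [hc, hpow]
          ring
        · rw [if_neg hc, if_neg (by omega)]
          push_cast [hpow]
          ring
      · obtain ⟨j, hj⟩ := ho
        have hj1 : 1 ≤ j := by omega
        rw [hj, josephus_odd j hj1,
          ih j (by omega) k hj1 (by omega) (by omega)]
        rw [if_neg (show ¬ (2 * j + 1 = 2 ^ (k + 1)) by omega)]
        by_cases hc : j = 2 ^ k
        · rw [if_pos hc, if_pos (by rw [hc])]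
          push_cast [hc, hpow]
          ring
        · have hcInt : ¬ ((2:Int) * ((j:Int) - ((2 ^ k : Nat):Int)) = (j:Int)) := by
            intro hcon
            have h2k : 2 ^ k ≤ j := by omega
            have hjlt : j < 2 * 2 ^ k := by rw [← hpow]; omega
            omega
          rw [if_neg hc, if_neg hcInt]
          push_cast [hpow]
          ring

def pvExt (n : Nat) (queue : List Int) (front c : Nat) : List Int :=
  (List.range c).map (fun i => queue.getD ((front + 1 + i) % n) 0)

-- distinct residues: front+a and front+b with a ≠ b, both in [1, n]
lemma pvMod_ne (n front a b : Nat) (ha : 1 ≤ a) (hb : b ≤ n) (hab : a < b) :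
    (front + a) % n ≠ (front + b) % n := by
  intro h
  have hm : Nat.ModEq n (front + a) (front + b) := h
  have hd := (Nat.modEq_iff_dvd' (by omega)).mp hm
  have hba : (front + b) - (front + a) = b - a := by omega
  rw [hba] at hd
  have := Nat.le_of_dvd (by omega) hd
  omega


lemma pvSet_getD_ne (l : List Int) (i j : Nat) (a : Int) (h : i ≠ j) :
    (l.set i a).getD j 0 = l.getD j 0 := by
  simp [List.getD]
  rw [List.getElem?_set_ne h]

lemma pvSet_getD_eq (l : List Int) (i : Nat) (a : Int) (h : i < l.length) :
    (l.set i a).getD i 0 = a := by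
  simp [List.getD]
  rw [List.getElem?_set_self]
  · simp
  · exact h

lemma pvExt_two (n : Nat) (q : List Int) (f c : Nat) :
    pvExt n q f (c + 2) = q.getD ((f + 1) % n) 0 :: q.getD ((f + 2) % n) 0 ::
      (List.range c).map (fun i => q.getD ((f + 3 + i) % n) 0) := by
  simp only [pvExt]
  rw [show c + 2 = (c + 1) + 1 from rfl]
  rw [List.range_succ_eq_map, List.range_succ_eq_map]
  simp only [List.map_cons, List.map_map]
  refine congrArg₂ _ (by norm_num) (congrArg₂ _ (by norm_num) ?_)
  apply List.map_congr_left
  intro x _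
  simp only [Function.comp_apply]
  congr 2
  omega

lemma pvExt_step (n c : Nat) (queue : List Int) (front : Nat)
    (hn : 2 ≤ n) (hlen : queue.length = n) (hc : 2 ≤ c) (hcn : c ≤ n - 1) :
    pvExt n (queue.set ((front + c + 1) % n) (queue.getD ((front + 2) % n) 0)) ((front + 2) % n) (c - 1)
      = (pvExt n queue front c).drop 2 ++ [queue.getD ((front + 2) % n) 0] := by
  obtain ⟨c', rfl⟩ : ∃ c', c = c' + 2 := ⟨c - 2, by omega⟩
  rw [pvExt_two]
  simp only [List.drop_succ_cons, List.drop_zero]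
  have hpos : ∀ i : Nat, (((front + 2) % n) + 1 + i) % n = (front + 3 + i) % n := by
    intro i
    rw [show ((front + 2) % n) + 1 + i = ((front + 2) % n) + (1 + i) by ring, Nat.mod_add_mod]
    congr 1
    omega
  simp only [pvExt]
  rw [show c' + 2 - 1 = c' + 1 from rfl, List.range_succ, List.map_append]
  congr 1
  · apply List.map_congr_left
    intro i hi
    simp only [List.mem_range] at hi
    rw [hpos i]
    apply pvSet_getD_ne
    have := pvMod_ne n front (3 + i) (c' + 2 + 1) (by omega) (by omega) (by omega)
    rw [show front + (3 + i) = front + 3 + i by ring, show front + (c' + 2 + 1) = front + (c' + 2) + 1 by ring] at this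
    exact this.symm
  · simp only [List.map_cons, List.map_nil]
    rw [hpos c']
    rw [show front + 3 + c' = front + (c' + 2) + 1 by ring]
    rw [pvSet_getD_eq]
    rw [hlen]
    exact Nat.mod_lt _ (by omega)

lemma pvLoopA_sim : ∀ (fuel n c : Nat) (queue : List Int) (front : Nat),
    2 ≤ n → queue.length = n → 1 ≤ c → c ≤ n - 1 → c ≤ fuel + 1 →
    pvLoopA n fuel queue front ((front + c) % n) = josephus (pvExt n queue front c) := by
  intro fuel
  induction fuel with
  | zero =>
    intro n c queue front hn hlen hc1 hcn hcf
    have hc : c = 1 := by omega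
    subst hc
    simp [pvLoopA, pvExt, josephus]
  | succ fuel ih =>
    intro n c queue front hn hlen hc1 hcn hcf
    by_cases hc : c = 1
    · subst hc
      have : (front + 1) % n = (front + 1) % n := rfl
      simp [pvLoopA, pvExt, josephus]
    · have hc2 : 2 ≤ c := by omega
      have hne : (front + 1) % n ≠ (front + c) % n := pvMod_ne n front 1 c (by omega) (by omega) (by omega)
      rw [pvLoopA, if_pos hne]
      show pvLoopA n fuel (queue.set (((front + c) % n + 1) % n) (queue.getD (((front + 1) % n + 1) % n) 0)) (((front + 1) % n + 1) % n) (((front + c) % n + 1) % n) = _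
      have hf2 : ((front + 1) % n + 1) % n = (front + 2) % n := by
        rw [Nat.mod_add_mod]
      have hr1 : ((front + c) % n + 1) % n = (front + c + 1) % n := by
        rw [Nat.mod_add_mod]
      rw [hf2, hr1]
      have hr2 : (front + c + 1) % n = ((front + 2) % n + (c - 1)) % n := by
        rw [Nat.mod_add_mod]
        congr 1
        omega
      rw [hr2]
      rw [ih n (c - 1) _ ((front + 2) % n) hn (by simpa using hlen) (by omega) (by omega) (by omega)]
      rw [← hr2]
      rw [pvExt_step n c queue front hn hlen hc2 hcn]
      -- josephus step on the old extract
      obtain ⟨c', rfl⟩ : ∃ c', c = c' + 2 := ⟨c - 2, by omega⟩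
      have hdecomp : pvExt n queue front (c' + 2)
          = queue.getD ((front + 1) % n) 0 :: queue.getD ((front + 2) % n) 0 ::
              (pvExt n queue front (c' + 2)).drop 2 := by
        rw [pvExt_two]
        simp
      rw [hdecomp, josephus_step]
      simp

lemma pvInit_fold (n : Nat) : ∀ (j : Nat), j < n →
    ((List.range j).map (fun k : Nat => (1 : Int) + k)).foldl
        (fun (s : List Int × Nat) i =>
          let rear := (s.2 + 1) % n
          (s.1.set rear i, rear))
        (List.replicate n 0, 0)
      = ((List.range n).map (fun i : Nat => if i ≤ j then (i : Int) else 0), j) := by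
  intro j
  induction j with
  | zero =>
    intro _
    simp only [List.range_zero, List.map_nil, List.foldl_nil]
    congr 1
    apply List.ext_getElem
    · simp
    · intro i h1 h2
      simp only [List.getElem_replicate, List.getElem_map, List.getElem_range]
      split
      · rename_i hle
        omega
      · rfl
  | succ j ih =>
    intro hj
    rw [List.range_succ, List.map_append, List.foldl_append]
    rw [ih (by omega)]
    simp only [List.map_cons, List.map_nil, List.foldl_cons, List.foldl_nil]
    have hr : (j + 1) % n = j + 1 := Nat.mod_eq_of_lt hj
    rw [hr]
    congr 1
    apply List.ext_getElem
    · simp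
    · intro i h1 h2
      simp only [List.length_set, List.length_map, List.length_range] at h1 h2
      rw [List.getElem_set]
      simp only [List.getElem_map, List.getElem_range]
      split
      · rw [if_pos (by omega)]
        omega
      · split <;> split <;> first | rfl | omega

lemma pvInitA_eq (N : Int) (h : 1 ≤ N) :
    pvInitA (N + 1).toNat N = ((List.range (N + 1).toNat).map (fun i : Nat => (i : Int)), N.toNat) := by
  unfold pvInitA
  rw [PySem.List.pyRange_one]
  have h1 : (N + 1 - 1).toNat = N.toNat := by omega
  have h2 : (N + 1).toNat = N.toNat + 1 := by omega
  rw [h1, h2]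
  have := pvInit_fold (N.toNat + 1) N.toNat (by omega)
  rw [this]
  congr 1
  apply List.map_congr_left
  intro x hx
  simp only [List.mem_range] at hx
  rw [if_pos (by omega)]

lemma pvExt_init (M : Nat) :
    pvExt (M + 1) ((List.range (M + 1)).map (fun i : Nat => (i : Int))) 0 M = pvL M := by
  unfold pvExt pvL
  apply List.map_congr_left
  intro i hi
  simp only [List.mem_range] at hi
  have hlt : 0 + 1 + i < M + 1 := by omega
  rw [Nat.mod_eq_of_lt hlt]
  rw [List.getD_eq_getElem _ _ (by simp; omega)]
  simp only [List.getElem_map, List.getElem_range]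
  push_cast
  ring

lemma pvAltLoop_pow : ∀ (fuel : Nat) (N : Int) (k : Nat), ((2 : Int) ^ k) ≤ N →
    N < 2 ^ k * 2 ^ fuel →
    ∃ j : Nat, pvAltLoop fuel N (2 ^ k) = 2 ^ j ∧ ((2 : Int) ^ j) ≤ N ∧ N < 2 ^ (j + 1) := by
  intro fuel
  induction fuel with
  | zero =>
    intro N k h1 h2
    simp at h2
    omega
  | succ fuel ih =>
    intro N k h1 h2
    rw [pvAltLoop]
    by_cases hc : (2 : Int) ^ k * 2 ≤ N
    · rw [if_pos hc]
      have hk1 : ((2 : Int) ^ (k + 1)) = 2 ^ k * 2 := by ring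
      have := ih N (k + 1) (by rw [hk1]; exact hc) (by
        calc N < 2 ^ k * 2 ^ (fuel + 1) := h2
        _ = 2 ^ (k + 1) * 2 ^ fuel := by ring)
      rw [← hk1]
      exact this
    · rw [if_neg hc]
      exact ⟨k, rfl, h1, by push Not at hc; calc N < 2 ^ k * 2 := hc
        _ = 2 ^ (k + 1) := by ring⟩

lemma last_card_eq_josephus (N : Int) (h : 1 ≤ N) :
    last_card N = josephus (pvL N.toNat) := by
  unfold last_card
  show pvLoopA ((N + 1).toNat) N.toNat (pvInitA ((N + 1).toNat) N).1 0 (pvInitA ((N + 1).toNat) N).2 = _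
  rw [pvInitA_eq N h]
  have h2 : (N + 1).toNat = N.toNat + 1 := by omega
  rw [h2]
  have hM : 1 ≤ N.toNat := by omega
  have hrear : N.toNat = (0 + N.toNat) % (N.toNat + 1) := by
    rw [Nat.zero_add, Nat.mod_eq_of_lt (by omega)]
  have hsim := pvLoopA_sim N.toNat (N.toNat + 1) N.toNat
    ((List.range (N.toNat + 1)).map (fun i : Nat => (i : Int))) 0
    (by omega) (by simp) hM (by omega) (by omega)
  rw [← hrear] at hsim
  dsimp only
  rw [hsim, pvExt_init N.toNat]

lemma last_card_agree (N : Int) (h : 1 ≤ N) : last_card N = last_card_alt N := by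
  have hM : 1 ≤ N.toNat := by omega
  have hNM : ((N.toNat : Int)) = N := by omega
  obtain ⟨j, hp, hj1, hj2⟩ := pvAltLoop_pow N.toNat N 0 (by simpa using h) (by
    have := Nat.lt_two_pow_self (n := N.toNat)
    have hcast : (N.toNat : Int) < ((2 ^ N.toNat : Nat) : Int) := by exact_mod_cast this
    push_cast at hcast
    simpa [hNM] using hcast)
  have hj1' : 2 ^ j ≤ N.toNat := by
    have : ((2 ^ j : Nat) : Int) ≤ (N.toNat : Int) := by push_cast; rw [hNM]; exact hj1
    exact_mod_cast this
  have hj2' : N.toNat < 2 ^ (j + 1) := by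
    have : ((N.toNat : Int)) < ((2 ^ (j + 1) : Nat) : Int) := by push_cast; rw [hNM]; exact hj2
    exact_mod_cast this
  rw [last_card_eq_josephus N h, josephus_closed N.toNat j hM hj1' hj2']
  unfold last_card_alt
  have hp1 : pvAltLoop N.toNat N 1 = 2 ^ j := by simpa using hp
  rw [hp1]
  by_cases hc : N.toNat = 2 ^ j
  · rw [if_pos hc, if_pos (by rw [← hNM, hc]; push_cast; ring)]
    exact hNM
  · rw [if_neg hc, if_neg (by
      intro hcon
      apply hc
      have : (N.toNat : Int) = ((2 ^ j : Nat) : Int) := by push_cast; rw [hNM]; exact hcon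
      exact_mod_cast this)]
    push_cast
    rw [hNM]


-- ===== VERDICT (by name: the statement is the Claim_ definition above) =====
theorem last_card_spec : Claim_equal_last_card := by
  intro N _ hPre
  unfold Spec_last_card
  exact last_card_agree N hPre
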